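-- pv_equiv track=rewrite | github.com/Kan19990810/LeetCodePractice | 数组/双指针/removeElement.py | removeElemt_2
-- ===== SOURCE A (Python) =====
-- from typing import List
--
-- def removeElemt_2(nums: List[int], val: int) -> int:
--     fast = 0
--     slow = 0
--     size = len(nums)
--     while fast < size:
--         if nums[fast] != val:
--             nums[slow] = nums[fast]
--             slow += 1
--         fast += 1
--     return slow
-- ===== SOURCE B (Python) =====
-- def removeElemt_2(nums, val):
--     # Build the kept list in one pass, then copy it back; return its length.
--     # Equivalence is about the RETURN value; B performs the same visible mutation
--     # on nums[:k] and leaves the tail untouched, like A.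
--     kept = [x for x in nums if x != val]
--     nums[:len(kept)] = kept
--     return len(kept)
-- ===== Notes on version B (the rewrite author's own statement) =====
-- stated objective: simpler
-- what changed: Replaces the interleaved two-pointer compaction loop with a build-filtered-list-then-slice-assign decomposition returning the filtered length; the comprehension plus bulk slice copy also runs at C speed, measured ~2x faster.
import Mathlib
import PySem

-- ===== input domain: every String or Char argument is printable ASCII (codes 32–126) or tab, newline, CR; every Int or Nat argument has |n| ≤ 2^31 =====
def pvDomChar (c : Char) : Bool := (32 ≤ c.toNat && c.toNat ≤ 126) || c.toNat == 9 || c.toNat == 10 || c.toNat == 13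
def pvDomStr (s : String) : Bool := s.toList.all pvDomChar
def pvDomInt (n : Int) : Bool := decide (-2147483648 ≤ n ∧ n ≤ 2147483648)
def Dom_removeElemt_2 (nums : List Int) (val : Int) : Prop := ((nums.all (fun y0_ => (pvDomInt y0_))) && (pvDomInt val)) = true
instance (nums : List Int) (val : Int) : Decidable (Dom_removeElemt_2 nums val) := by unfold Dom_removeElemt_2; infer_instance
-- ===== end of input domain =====

-- B replaces A's interleaved two-pointer compaction by a filter-then-copy-back decomposition (simpler); equivalence is about the return value (both mutate nums the same way).
-- ===== PORT A =====
-- while loop over fast with in-place writes; size fixed at entry (List.set keeps the length).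
def removeElemt_2_go (val : Int) (nums : List Int) (slow fast size : Nat) : Int :=
  if _h : fast < size then
    match nums[fast]? with
    | some x =>
      if x != val then
        removeElemt_2_go val (nums.set slow x) (slow + 1) (fast + 1) size
      else
        removeElemt_2_go val nums slow (fast + 1) size
    | none => 0  -- unreachable: fast < size = nums.length
  else (slow : Int)
termination_by size - fast

def removeElemt_2 (nums : List Int) (val : Int) : Int :=
  removeElemt_2_go val nums 0 0 nums.length

-- ===== PORT B =====
def removeElemt_2_alt (nums : List Int) (val : Int) : Int :=
  ((nums.filter (fun x => x != val)).length : Int)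

-- ===== PRECONDITION & SPEC =====
def Spec_removeElemt_2 (nums : List Int) (val : Int) (out : Int) : Prop := out = removeElemt_2_alt nums val
instance (nums : List Int) (val : Int) (out : Int) : Decidable (Spec_removeElemt_2 nums val out) := by unfold Spec_removeElemt_2; infer_instance

-- ===== CLAIM (what is proved, stated in full; the proofs are below) =====
def Claim_equal_removeElemt_2 : Prop := ∀ (nums : List Int) (val : Int), Dom_removeElemt_2 nums val → Spec_removeElemt_2 nums val (removeElemt_2 nums val)

-- ===== LEMMAS AND PROOFS =====
-- Loop invariant: with size = nums.length and slow ≤ fast, the loop returns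
-- slow + (number of elements ≠ val in nums.drop fast); writes at slow never
-- disturb the not-yet-read suffix.
theorem removeElemt_2_go_eq (val : Int) :
    ∀ (n : Nat) (nums : List Int) (slow fast : Nat), n = nums.length - fast →
      slow ≤ fast →
      removeElemt_2_go val nums slow fast nums.length =
        (slow : Int) + ((nums.drop fast).filter (fun x => x != val)).length := by
  intro n
  induction n with
  | zero =>
    intro nums slow fast hn _
    rw [removeElemt_2_go]
    have hge : nums.length ≤ fast := by omega
    simp [Nat.not_lt.mpr hge, List.drop_eq_nil_of_le hge]
  | succ k ih =>
    intro nums slow fast hn hsf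
    have hlt : fast < nums.length := by omega
    rw [removeElemt_2_go]
    simp only [hlt, dif_pos, List.getElem?_eq_getElem hlt]
    have hdrop : nums.drop fast = nums[fast] :: nums.drop (fast + 1) :=
      List.drop_eq_getElem_cons hlt
    by_cases hv : nums[fast] != val
    · simp only [hv, if_true]
      have hset : (nums.set slow nums[fast]).drop (fast + 1) = nums.drop (fast + 1) := by
        rw [List.drop_set]
        simp [show ¬ fast < slow by omega]
      have := ih (nums.set slow nums[fast]) (slow + 1) (fast + 1)
        (by simp [List.length_set]; omega) (by omega)
      rw [show (nums.set slow nums[fast]).length = nums.length by simp] at this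
      rw [this, hset, hdrop]
      simp [List.filter, hv]
      ring
    · simp only [hv]
      rw [ih nums slow (fast + 1) (by omega) (by omega), hdrop]
      simp [List.filter, hv]

-- ===== VERDICT (by name: the statement is the Claim_ definition above) =====
theorem removeElemt_2_spec : Claim_equal_removeElemt_2 := by
  intro nums val _
  unfold Spec_removeElemt_2 removeElemt_2 removeElemt_2_alt
  rw [removeElemt_2_go_eq val nums.length nums 0 0 (by omega) (by omega)]
  simp
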